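-- pv_equiv track=rewrite | github.com/Alireza-Kazemifard/kidney-exchange-simulator | kidney.py | _find_cycles_and_w_chains
-- ===== SOURCE A (Python) =====
-- def _find_cycles_and_w_chains(pointers, active_patients, processed_in_keep=None):
--     if processed_in_keep is None:
--         processed_in_keep = set()
--
--     cycles, chains, visited = [], [], set()
--     for p_id in active_patients:
--         if p_id in visited:
--             continue
--
--         path, curr = [], p_id
--         while curr in pointers and curr not in path and curr not in processed_in_keep:
--             path.append(curr)
--             curr = pointers.get(curr)
--
--         if curr == 'w':
--             chains.append(path + ['w'])
--         elif curr in processed_in_keep: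
--             chains.append(path + [curr])
--         elif curr in path:
--             cycle = path[path.index(curr):]
--             cycles.append(cycle)
--
--         visited.update(path)
--
--     unique_cycles, seen_nodes = [], set()
--     for cycle in cycles:
--         has_overlap = False
--         for node in cycle:
--             if node in seen_nodes:
--                 has_overlap = True
--                 break
--         if not has_overlap:
--             unique_cycles.append(cycle)
--             seen_nodes.update(cycle)
--
--     return unique_cycles, chains
-- ===== SOURCE B (Python) =====
-- def _find_cycles_and_w_chains(pointers, active_patients, processed_in_keep=None):
--     processed = processed_in_keep if processed_in_keep is not None else set()
--
--     def step(node):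
--         return pointers[node] if node in pointers and node not in processed else None
--
--     # Phase 1: a node is on a cycle iff following pointers at most len(pointers)
--     # steps from it leads back to it.
--     n = len(pointers)
--     cyclic = set()
--     for node in pointers:
--         curr = node
--         for _ in range(n):
--             curr = step(curr)
--             if curr is None:
--                 break
--             if curr == node:
--                 cyclic.add(node)
--                 break
--
--     cycles, chains = [], []
--     visited, seen = set(), set()
--     for p_id in active_patients:
--         if p_id in visited:
--             continue
--         path, curr, entry_idx = [], p_id, None
--         while step(curr) is not None:
--             nxt = step(curr)
--             if curr in cyclic:
--                 # unroll this cycle once; it ends back at its entry node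
--                 entry, entry_idx = curr, len(path)
--                 path.append(curr)
--                 curr = nxt
--                 while curr != entry and step(curr) is not None:
--                     path.append(curr)
--                     curr = step(curr)
--                 break
--             path.append(curr)
--             curr = nxt
--         visited.update(path)
--         if curr == 'w':
--             chains.append(path + ['w'])
--         elif curr in processed:
--             chains.append(path + [curr])
--         elif entry_idx is not None and curr not in seen:
--             cycle = path[entry_idx:]
--             cycles.append(cycle)
--             seen.update(cycle)
--     return cycles, chains
-- ===== Notes on version B (the rewrite author's own statement) =====
-- stated objective: alternative
-- what changed: B first computes the set of cycle nodes of the functional graph globally (a node is cyclic iff at most len(pointers) pointer steps return to it), then each walk needs no path-membership scan or repeat detection: it stops on a dead end or unrolls the precomputed cycle from its entry, and the separate overlap-dedup pass disappears into a single entry-node membership test (cycles of a functional graph are disjoint).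
import Mathlib
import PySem

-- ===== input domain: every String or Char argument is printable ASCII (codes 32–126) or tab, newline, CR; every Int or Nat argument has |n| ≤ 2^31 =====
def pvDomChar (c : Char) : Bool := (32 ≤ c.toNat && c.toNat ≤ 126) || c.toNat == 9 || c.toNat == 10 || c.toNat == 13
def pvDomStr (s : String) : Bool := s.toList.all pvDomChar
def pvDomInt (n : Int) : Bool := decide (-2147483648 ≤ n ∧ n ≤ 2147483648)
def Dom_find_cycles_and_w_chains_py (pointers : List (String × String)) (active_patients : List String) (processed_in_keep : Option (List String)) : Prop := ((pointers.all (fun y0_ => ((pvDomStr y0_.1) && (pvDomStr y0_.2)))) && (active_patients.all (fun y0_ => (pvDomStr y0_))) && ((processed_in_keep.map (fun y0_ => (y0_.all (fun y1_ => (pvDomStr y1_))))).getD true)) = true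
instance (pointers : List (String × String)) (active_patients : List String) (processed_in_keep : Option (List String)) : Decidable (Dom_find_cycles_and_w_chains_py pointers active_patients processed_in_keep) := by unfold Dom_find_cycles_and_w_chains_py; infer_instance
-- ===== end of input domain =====

-- B precomputes the set of cycle nodes of the pointer graph and unrolls precomputed
-- cycles instead of scanning the walk path; return value only, no argument is mutated.


-- ===== PORT A =====
-- A's inner while loop; fuel = pointers.length + 1 bounds it: each iteration appends a
-- fresh node (not yet in path) that is a key of the dict, so there are at most |keys| appends.
def pvWalkA (d : PySem.Dict String String) (processed : List String) :
    Nat → List String → String → List String × String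
  | 0, path, curr => (path, curr)
  | fuel + 1, path, curr =>
    match d.get? curr with
    | none => (path, curr)
    | some nxt =>
      if path.contains curr || processed.contains curr then (path, curr)
      else pvWalkA d processed fuel (path ++ [curr]) nxt

def pvStepA (d : PySem.Dict String String) (processed : List String) (fuel : Nat)
    (st : List (List String) × List (List String) × PySem.Set String) (p : String) :
    List (List String) × List (List String) × PySem.Set String :=
  if PySem.Set.contains st.2.2 p then st
  else
    let w := pvWalkA d processed fuel [] p
    let path := w.1
    let curr := w.2
    let visited' := PySem.Set.update st.2.2 path
    if curr == "w" then (st.1, st.2.1 ++ [path ++ ["w"]], visited')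
    else if processed.contains curr then (st.1, st.2.1 ++ [path ++ [curr]], visited')
    else
      match PySem.List.index? path curr with
      | some i => (st.1 ++ [path.drop i], st.2.1, visited')
      | none => (st.1, st.2.1, visited')

-- A's second pass: drop every cycle that overlaps an already-kept one
def pvDedupA (st : List (List String) × PySem.Set String) (cycle : List String) :
    List (List String) × PySem.Set String :=
  if cycle.any (fun node => PySem.Set.contains st.2 node) then st
  else (st.1 ++ [cycle], PySem.Set.update st.2 cycle)

def find_cycles_and_w_chains_py (pointers : List (String × String)) (active_patients : List String) (processed_in_keep : Option (List String)) : List (List String) × List (List String) :=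
  let processed : PySem.Set String := processed_in_keep.getD PySem.Set.empty
  let d := PySem.Dict.ofList pointers
  let st := active_patients.foldl (pvStepA d processed (pointers.length + 1))
              ([], [], PySem.Set.empty)
  let dd := st.1.foldl pvDedupA ([], PySem.Set.empty)
  (dd.1, st.2.1)

-- ===== PORT B =====
-- step(node): pointers[node] if node in pointers and node not in processed else None
def pvStepF (d : PySem.Dict String String) (processed : List String) (x : String) :
    Option String :=
  match d.get? x with
  | none => none
  | some y => if processed.contains x then none else some y

-- B's phase-1 inner for-loop over range(n): does stepping reach `node` again?
def pvCycGo (f : String → Option String) (node : String) : Nat → String → Bool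
  | 0, _ => false
  | k + 1, curr =>
    match f curr with
    | none => false
    | some c => if c == node then true else pvCycGo f node k c

-- B's phase 1: the set of cycle nodes (for node in pointers: ...)
def pvCycSet (f : String → Option String) (keys : List String) (n : Nat) : PySem.Set String :=
  keys.foldl (fun s node => if pvCycGo f node n node then PySem.Set.add s node else s)
    PySem.Set.empty

-- B's cycle unrolling: while curr != entry and step(curr) is not None
def pvUnroll (f : String → Option String) (entry : String) :
    Nat → List String → String → List String × String
  | 0, path, curr => (path, curr)
  | fuel + 1, path, curr =>
    if curr == entry then (path, curr)
    else match f curr with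
      | none => (path, curr)
      | some nxt => pvUnroll f entry fuel (path ++ [curr]) nxt

-- B's walk: no path-membership scan; it stops on a dead end or unrolls the cycle
def pvWalkB (f : String → Option String) (cyc : PySem.Set String) (ufuel : Nat) :
    Nat → List String → String → List String × String × Option Nat
  | 0, path, curr => (path, curr, none)
  | fuel + 1, path, curr =>
    match f curr with
    | none => (path, curr, none)
    | some nxt =>
      if PySem.Set.contains cyc curr then
        let r := pvUnroll f curr ufuel (path ++ [curr]) nxt
        (r.1, r.2, some path.length)
      else pvWalkB f cyc ufuel fuel (path ++ [curr]) nxt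

-- B's loop body over active_patients; state = (cycles, chains, visited, seen)
def pvStepB (f : String → Option String) (processed : List String) (cyc : PySem.Set String)
    (fuel : Nat)
    (st : List (List String) × List (List String) × PySem.Set String × PySem.Set String)
    (p : String) :
    List (List String) × List (List String) × PySem.Set String × PySem.Set String :=
  if PySem.Set.contains st.2.2.1 p then st
  else
    let w := pvWalkB f cyc fuel fuel [] p
    let path := w.1
    let curr := w.2.1
    let idx := w.2.2
    let visited' := PySem.Set.update st.2.2.1 path
    if curr == "w" then (st.1, st.2.1 ++ [path ++ ["w"]], visited', st.2.2.2)
    else if processed.contains curr then (st.1, st.2.1 ++ [path ++ [curr]], visited', st.2.2.2)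
    else
      match idx with
      | some i =>
        if PySem.Set.contains st.2.2.2 curr then (st.1, st.2.1, visited', st.2.2.2)
        else (st.1 ++ [path.drop i], st.2.1, visited', PySem.Set.update st.2.2.2 (path.drop i))
      | none => (st.1, st.2.1, visited', st.2.2.2)

def find_cycles_and_w_chains_py_alt (pointers : List (String × String)) (active_patients : List String) (processed_in_keep : Option (List String)) : List (List String) × List (List String) :=
  let processed : PySem.Set String := processed_in_keep.getD PySem.Set.empty
  let d := PySem.Dict.ofList pointers
  let f := pvStepF d processed
  let n := d.size
  let cyc := pvCycSet f d.keys n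
  let st := active_patients.foldl (pvStepB f processed cyc (n + 1))
              ([], [], PySem.Set.empty, PySem.Set.empty)
  (st.1, st.2.1)

-- ===== PRECONDITION & SPEC =====
def Spec_find_cycles_and_w_chains_py (pointers : List (String × String)) (active_patients : List String) (processed_in_keep : Option (List String)) (out : List (List String) × List (List String)) : Prop := out = find_cycles_and_w_chains_py_alt pointers active_patients processed_in_keep
instance (pointers : List (String × String)) (active_patients : List String) (processed_in_keep : Option (List String)) (out : List (List String) × List (List String)) : Decidable (Spec_find_cycles_and_w_chains_py pointers active_patients processed_in_keep out) := by unfold Spec_find_cycles_and_w_chains_py; infer_instance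

-- ===== CLAIM (what is proved, stated in full; the proofs are below) =====
def Claim_equal_find_cycles_and_w_chains_py : Prop := ∀ (pointers : List (String × String)) (active_patients : List String) (processed_in_keep : Option (List String)), Dom_find_cycles_and_w_chains_py pointers active_patients processed_in_keep → Spec_find_cycles_and_w_chains_py pointers active_patients processed_in_keep (find_cycles_and_w_chains_py pointers active_patients processed_in_keep)

-- ===== LEMMAS AND PROOFS =====

-- iterate the step function k times
def pvIter (f : String → Option String) : Nat → String → Option String
  | 0, x => some x
  | k + 1, x =>
    match f x with
    | none => none
    | some y => pvIter f k y

-- x eventually steps back to itself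
def pvRet (f : String → Option String) (x : String) : Prop :=
  ∃ m, 1 ≤ m ∧ pvIter f m x = some x

-- the list [x, f x, f² x, …] of length p (values defaulted; used only when defined)
def pvOrbit (f : String → Option String) (e : String) (p : Nat) : List String :=
  (List.range p).map (fun j => (pvIter f j e).getD e)

-- path is a consecutive f-chain ending just before curr
def pvChainP (f : String → Option String) : List String → String → Prop
  | [], _ => True
  | x :: rest, curr => f x = some (rest.headD curr) ∧ pvChainP f rest curr

lemma pvContains_true (l : List String) (x : String) (h : x ∈ l) : l.contains x = true :=
  List.contains_iff_mem.mpr h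

lemma pvContains_false (l : List String) (x : String) (h : x ∉ l) : l.contains x = false := by
  rw [Bool.eq_false_iff]
  intro hc
  exact h (List.contains_iff_mem.mp hc)

lemma pvSetContains_iff (s : PySem.Set String) (x : String) :
    PySem.Set.contains s x = true ↔ x ∈ s :=
  List.contains_iff_mem

lemma pvIter_add (f : String → Option String) (a b : Nat) (x : String) :
    pvIter f (a + b) x =
      match pvIter f a x with
      | none => none
      | some y => pvIter f b y := by
  induction a generalizing x with
  | zero => simp [pvIter]
  | succ a ih =>
    have h : a + 1 + b = (a + b) + 1 := by omega
    rw [h]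
    cases hfx : f x with
    | none => simp [pvIter, hfx]
    | some y => simp [pvIter, hfx, ih]

lemma pvIter_add' (f : String → Option String) (a b : Nat) (x y : String)
    (h : pvIter f a x = some y) : pvIter f (a + b) x = pvIter f b y := by
  rw [pvIter_add f a b x, h]

lemma pvIter_one (f : String → Option String) (x : String) : pvIter f 1 x = f x := by
  cases hfx : f x <;> simp [pvIter, hfx]

lemma pvIter_step (f : String → Option String) (m : Nat) (x z : String)
    (h1 : 1 ≤ m) (h : pvIter f m x = some z) : ∃ y, f x = some y := by
  cases m with
  | zero => omega
  | succ m =>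
    cases hfx : f x with
    | none => simp [pvIter, hfx] at h
    | some y => exact ⟨y, rfl⟩

lemma pvIter_isSome_of_le (f : String → Option String) (x z : String) (p j : Nat)
    (hj : j ≤ p) (h : pvIter f p x = some z) : ∃ a, pvIter f j x = some a := by
  cases hja : pvIter f j x with
  | some a => exact ⟨a, rfl⟩
  | none =>
    exfalso
    have hsplit := pvIter_add f j (p - j) x
    rw [Nat.add_sub_cancel' hj, hja] at hsplit
    rw [h] at hsplit
    simp at hsplit

lemma pvIter_chunk (f : String → Option String) (x a : String) (j p : Nat) (hj : j ≤ p)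
    (hja : pvIter f j x = some a) (z : String) (h : pvIter f p x = some z) :
    pvIter f (p - j) a = some z := by
  have hsplit := pvIter_add' f j (p - j) x a hja
  rw [Nat.add_sub_cancel' hj] at hsplit
  rw [hsplit] at h
  exact h

lemma pvIter_ne_of_min (f : String → Option String) (e : String) (p i j : Nat)
    (hpe : pvIter f p e = some e)
    (hmin : ∀ q, q < p → ¬(1 ≤ q ∧ pvIter f q e = some e))
    (hij : i < j) (hjp : j < p) : pvIter f i e ≠ pvIter f j e := by
  intro heq
  obtain ⟨a, ha⟩ := pvIter_isSome_of_le f e e p j (le_of_lt hjp) hpe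
  have hrem : pvIter f (p - j) a = some e := pvIter_chunk f e a j p (le_of_lt hjp) ha e hpe
  have h1 : pvIter f (i + (p - j)) e = some e := by
    rw [pvIter_add' f i (p - j) e a (heq.trans ha)]
    exact hrem
  exact hmin (i + (p - j)) (by omega) ⟨by omega, h1⟩

lemma pvOrbit_length (f : String → Option String) (e : String) (p : Nat) :
    (pvOrbit f e p).length = p := by simp [pvOrbit]

lemma pvOrbit_succ (f : String → Option String) (e a : String) (k : Nat)
    (ha : pvIter f k e = some a) :
    pvOrbit f e (k + 1) = pvOrbit f e k ++ [a] := by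
  simp [pvOrbit, List.range_succ, ha]

lemma pvOrbit_head (f : String → Option String) (e : String) (p : Nat) (hp1 : 1 ≤ p) :
    e ∈ pvOrbit f e p := by
  cases p with
  | zero => omega
  | succ q =>
    have h0 : (pvIter f 0 e).getD e = e := by simp [pvIter]
    exact List.mem_map.mpr ⟨0, List.mem_range.mpr (by omega), h0⟩

lemma pvOrbit_cons (f : String → Option String) (e : String) (p : Nat) (hp1 : 1 ≤ p) :
    ∃ t, pvOrbit f e p = e :: t := by
  cases p with
  | zero => omega
  | succ q =>
    refine ⟨(List.range q).map (fun j => (pvIter f (j + 1) e).getD e), ?_⟩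
    unfold pvOrbit
    rw [List.range_succ_eq_map]
    simp [List.map_map, Function.comp_def, pvIter]

lemma pvOrbit_mem (f : String → Option String) (e x : String) (p : Nat)
    (hpe : pvIter f p e = some e) :
    x ∈ pvOrbit f e p ↔ ∃ j, j < p ∧ pvIter f j e = some x := by
  constructor
  · intro hx
    obtain ⟨j, hj, hg⟩ := List.mem_map.mp hx
    have hjp := List.mem_range.mp hj
    obtain ⟨a, ha⟩ := pvIter_isSome_of_le f e e p j (le_of_lt hjp) hpe
    rw [ha] at hg
    simp at hg
    exact ⟨j, hjp, by rw [ha, hg]⟩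
  · rintro ⟨j, hjp, hj⟩
    exact List.mem_map.mpr ⟨j, List.mem_range.mpr hjp, by rw [hj]; rfl⟩

lemma pvOrbit_nodup (f : String → Option String) (e : String) (p : Nat)
    (hpe : pvIter f p e = some e)
    (hmin : ∀ q, q < p → ¬(1 ≤ q ∧ pvIter f q e = some e)) :
    (pvOrbit f e p).Nodup := by
  refine List.Nodup.map_on ?_ List.nodup_range
  intro i hi j hj heq
  have hip := List.mem_range.mp hi
  have hjp := List.mem_range.mp hj
  by_contra hne
  obtain ⟨ai, hai⟩ := pvIter_isSome_of_le f e e p i (le_of_lt hip) hpe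
  obtain ⟨aj, haj⟩ := pvIter_isSome_of_le f e e p j (le_of_lt hjp) hpe
  rw [hai, haj] at heq
  simp at heq
  rcases Nat.lt_trichotomy i j with h | h | h
  · exact pvIter_ne_of_min f e p i j hpe hmin h hjp (by rw [hai, haj, heq])
  · exact hne h
  · exact pvIter_ne_of_min f e p j i hpe hmin h hip (by rw [hai, haj, heq])

lemma pvOrbit_ret (f : String → Option String) (e x : String) (p : Nat)
    (hp1 : 1 ≤ p) (hpe : pvIter f p e = some e) (hx : x ∈ pvOrbit f e p) :
    pvRet f x := by
  obtain ⟨j, hjp, hj⟩ := (pvOrbit_mem f e x p hpe).mp hx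
  have hrem : pvIter f (p - j) x = some e := pvIter_chunk f e x j p (le_of_lt hjp) hj e hpe
  refine ⟨(p - j) + j, by omega, ?_⟩
  rw [pvIter_add' f (p - j) j x e hrem]
  exact hj

lemma pvOrbit_next (f : String → Option String) (e x : String) (p : Nat)
    (hp1 : 1 ≤ p) (hpe : pvIter f p e = some e) (hx : x ∈ pvOrbit f e p) :
    ∃ y, f x = some y ∧ y ∈ pvOrbit f e p := by
  obtain ⟨j, hjp, hj⟩ := (pvOrbit_mem f e x p hpe).mp hx
  obtain ⟨b, hb⟩ := pvIter_isSome_of_le f e e p (j + 1) (by omega) hpe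
  have hfx : f x = some b := by
    rw [← pvIter_one f x, ← pvIter_add' f j 1 e x hj]
    exact hb
  refine ⟨b, hfx, ?_⟩
  by_cases hjp1 : j + 1 < p
  · exact (pvOrbit_mem f e b p hpe).mpr ⟨j + 1, hjp1, hb⟩
  · have hje : j + 1 = p := by omega
    rw [hje, hpe] at hb
    have hbe : b = e := by simpa using hb.symm
    rw [hbe]
    exact pvOrbit_head f e p hp1

-- minimal return time is at most the number of keys
lemma pvRet_bounded (f : String → Option String) (K : List String)
    (hK : ∀ x y, f x = some y → x ∈ K) (hKnd : K.Nodup) (x : String) (hr : pvRet f x) :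
    ∃ j, 1 ≤ j ∧ j ≤ K.length ∧ pvIter f j x = some x := by
  haveI : DecidablePred (fun j => 1 ≤ j ∧ pvIter f j x = some x) := fun j => inferInstance
  have hp := Nat.find_spec hr
  set p := Nat.find hr with hpdef
  have hmin : ∀ q, q < p → ¬(1 ≤ q ∧ pvIter f q x = some x) := fun q hq => Nat.find_min hr hq
  have hnd := pvOrbit_nodup f x p hp.2 hmin
  have hsub : ∀ z ∈ pvOrbit f x p, z ∈ K := by
    intro z hz
    obtain ⟨y, hy, _⟩ := pvOrbit_next f x z p hp.1 hp.2 hz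
    exact hK z y hy
  have hle := (List.subperm_of_subset hnd hsub).length_le
  rw [pvOrbit_length] at hle
  exact ⟨p, hp.1, hle, hp.2⟩

lemma pvChain_iter (f : String → Option String) :
    ∀ (path : List String) (curr : String), pvChainP f path curr →
      pvIter f path.length (path.headD curr) = some curr := by
  intro path
  induction path with
  | nil => intro curr _; simp [pvIter]
  | cons y rest ih =>
    intro curr h
    obtain ⟨hy, hr⟩ := h
    show pvIter f (rest.length + 1) y = some curr
    simp only [pvIter, hy]
    exact ih curr hr

lemma pvChain_reach (f : String → Option String) :
    ∀ (path : List String) (curr x : String), pvChainP f path curr → x ∈ path →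
      ∃ m, 1 ≤ m ∧ pvIter f m x = some curr := by
  intro path
  induction path with
  | nil => intro curr x _ hx; simp at hx
  | cons y rest ih =>
    intro curr x h hx
    obtain ⟨hy, hr⟩ := h
    rcases List.mem_cons.mp hx with hxy | hxr
    · subst hxy
      refine ⟨rest.length + 1, by omega, ?_⟩
      simp only [pvIter, hy]
      exact pvChain_iter f rest curr hr
    · exact ih curr x hr hxr

lemma pvChain_append (f : String → Option String) :
    ∀ (path : List String) (curr nxt : String), pvChainP f path curr →
      f curr = some nxt → pvChainP f (path ++ [curr]) nxt := by
  intro path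
  induction path with
  | nil =>
    intro curr nxt _ hc
    exact ⟨by simpa using hc, trivial⟩
  | cons y rest ih =>
    intro curr nxt h hc
    obtain ⟨hy, hr⟩ := h
    refine ⟨?_, ih curr nxt hr hc⟩
    cases rest with
    | nil => simpa using hy
    | cons z t => simpa using hy

-- a repeated walk head would close the chain into a cycle
lemma pvChain_not_ret (f : String → Option String) (path : List String) (curr : String)
    (hch : pvChainP f path curr) (hmem : curr ∈ path) : pvRet f curr := by
  obtain ⟨m, hm, hit⟩ := pvChain_reach f path curr curr hch hmem
  exact ⟨m, hm, hit⟩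

-- pvStepF facts
lemma pvStepF_some (d : PySem.Dict String String) (processed : List String) (x y : String)
    (h : pvStepF d processed x = some y) :
    d.get? x = some y ∧ processed.contains x = false := by
  unfold pvStepF at h
  cases hd : d.get? x with
  | none => rw [hd] at h; simp at h
  | some z =>
    rw [hd] at h
    cases hp : processed.contains x with
    | true => rw [hp] at h; simp at h
    | false =>
      rw [hp] at h
      simp at h
      exact ⟨by rw [h], rfl⟩

lemma pvStepF_none (d : PySem.Dict String String) (processed : List String) (x : String)
    (h : pvStepF d processed x = none) :
    d.get? x = none ∨ processed.contains x = true := by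
  unfold pvStepF at h
  cases hd : d.get? x with
  | none => exact Or.inl rfl
  | some z =>
    rw [hd] at h
    cases hp : processed.contains x with
    | true => exact Or.inr rfl
    | false => rw [hp] at h; simp at h

-- phase-1 loop characterisation
lemma pvCycGo_iff (f : String → Option String) (node : String) :
    ∀ (k : Nat) (c : String), pvCycGo f node k c = true ↔
      ∃ j, 1 ≤ j ∧ j ≤ k ∧ pvIter f j c = some node := by
  intro k
  induction k with
  | zero =>
    intro c
    simp only [pvCycGo]
    constructor
    · intro h; simp at h
    · rintro ⟨j, h1, h2, _⟩; omega
  | succ k ih =>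
    intro c
    cases hfc : f c with
    | none =>
      simp only [pvCycGo, hfc]
      constructor
      · intro h; simp at h
      · rintro ⟨j, h1, h2, hit⟩
        cases j with
        | zero => omega
        | succ j' => simp [pvIter, hfc] at hit
    | some y =>
      by_cases hy : y = node
      · subst hy
        simp only [pvCycGo, hfc, beq_self_eq_true, if_true]
        constructor
        · intro _
          exact ⟨1, le_refl 1, by omega, by rw [pvIter_one, hfc]⟩
        · intro _; trivial
      · have hyb : (y == node) = false := by simpa using hy
        simp only [pvCycGo, hfc, hyb, Bool.false_eq_true, if_false]
        rw [ih y]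
        constructor
        · rintro ⟨j, h1, h2, hit⟩
          refine ⟨j + 1, by omega, by omega, ?_⟩
          simpa [pvIter, hfc] using hit
        · rintro ⟨j, h1, h2, hit⟩
          cases j with
          | zero => omega
          | succ j' =>
            have hit' : pvIter f j' y = some node := by simpa [pvIter, hfc] using hit
            cases j' with
            | zero =>
              simp [pvIter] at hit'
              exact absurd hit' hy
            | succ j'' => exact ⟨j'' + 1, by omega, by omega, hit'⟩

lemma pvFoldAdd_mem (p : String → Bool) (l : List String) :
    ∀ (s : PySem.Set String) (x : String),
      x ∈ (l.foldl (fun s node => if p node then PySem.Set.add s node else s) s) ↔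
        x ∈ s ∨ (x ∈ l ∧ p x = true) := by
  induction l with
  | nil => intro s x; simp
  | cons y l ih =>
    intro s x
    simp only [List.foldl_cons]
    rw [ih]
    by_cases hy : p y = true
    · simp only [hy, if_true]
      rw [PySem.Set.mem_add]
      constructor
      · rintro ((h | h) | h)
        · exact Or.inl h
        · subst h; exact Or.inr ⟨List.mem_cons_self, hy⟩
        · exact Or.inr ⟨List.mem_cons_of_mem y h.1, h.2⟩
      · rintro (h | ⟨hm, hp⟩)
        · exact Or.inl (Or.inl h)
        · rcases List.mem_cons.mp hm with h | h
          · exact Or.inl (Or.inr h)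
          · exact Or.inr ⟨h, hp⟩
    · have hy' : p y = false := by simpa using hy
      simp only [hy', Bool.false_eq_true, if_false]
      constructor
      · rintro (h | h)
        · exact Or.inl h
        · exact Or.inr ⟨List.mem_cons_of_mem y h.1, h.2⟩
      · rintro (h | ⟨hm, hp⟩)
        · exact Or.inl h
        · rcases List.mem_cons.mp hm with h | h
          · subst h; rw [hp] at hy'; simp at hy'
          · exact Or.inr ⟨h, hp⟩

-- the precomputed set contains exactly the returning nodes
lemma pvCycSet_iff (d : PySem.Dict String String) (processed : List String)
    (K : List String)
    (hK : ∀ x y, pvStepF d processed x = some y → x ∈ K) (hKnd : K.Nodup) (x : String) :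
    PySem.Set.contains (pvCycSet (pvStepF d processed) K K.length) x = true ↔
      pvRet (pvStepF d processed) x := by
  rw [pvSetContains_iff]
  unfold pvCycSet
  rw [pvFoldAdd_mem]
  simp only [PySem.Set.empty, List.not_mem_nil, false_or]
  constructor
  · rintro ⟨hmem, hgo⟩
    obtain ⟨j, h1, _, hit⟩ := (pvCycGo_iff (pvStepF d processed) x K.length x).mp hgo
    exact ⟨j, h1, hit⟩
  · intro hr
    obtain ⟨j, h1, h2, hit⟩ := pvRet_bounded (pvStepF d processed) K hK hKnd x hr
    obtain ⟨y, hy⟩ := pvIter_step (pvStepF d processed) j x x h1 hit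
    refine ⟨hK x y hy, (pvCycGo_iff (pvStepF d processed) x K.length x).mpr ⟨j, h1, h2, hit⟩⟩

-- seen stays closed under stepping
def pvSeenClosed (f : String → Option String) (s : PySem.Set String) : Prop :=
  ∀ x, x ∈ s → ∃ y, f x = some y ∧ y ∈ s

lemma pvSeenClosed_iter (f : String → Option String) (s : PySem.Set String)
    (h : pvSeenClosed f s) (k : Nat) :
    ∀ (x y : String), x ∈ s → pvIter f k x = some y → y ∈ s := by
  induction k with
  | zero => intro x y hx hit; simp [pvIter] at hit; exact hit ▸ hx
  | succ k ih =>
    intro x y hx hit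
    obtain ⟨z, hz, hzs⟩ := h x hx
    have hit' : pvIter f k z = some y := by simpa [pvIter, hz] using hit
    exact ih z y hzs hit'

lemma pvIndex?_append_of_notin (l t : List String) (c : String) (hc : c ∉ l) :
    PySem.List.index? (l ++ t) c = (PySem.List.index? t c).map (· + l.length) := by
  induction l with
  | nil => simp [Option.map_id']
  | cons y l ih =>
    have hy : y ≠ c := fun h => hc (h ▸ List.mem_cons_self)
    have hc' : c ∉ l := fun h => hc (List.mem_cons_of_mem y h)
    rw [List.cons_append, PySem.List.index?_cons_of_ne _ hy, ih hc']
    cases PySem.List.index? t c with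
    | none => rfl
    | some i => simp; omega

-- ===== the in-cycle phase: A's walk and B's unroll both traverse the cycle once =====
lemma pvW2 (d : PySem.Dict String String) (processed : List String)
    (e : String) (p : Nat)
    (hp1 : 1 ≤ p) (hpe : pvIter (pvStepF d processed) p e = some e)
    (hmin : ∀ q, q < p → ¬(1 ≤ q ∧ pvIter (pvStepF d processed) q e = some e))
    (pre : List String) (hpre : ∀ x ∈ pre, ¬ pvRet (pvStepF d processed) x) :
    ∀ (m k fa fb : Nat) (a : String), m = p - k → 1 ≤ k → k ≤ p →
      p - k ≤ fa → p - k ≤ fb →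
      pvIter (pvStepF d processed) k e = some a →
      pvWalkA d processed fa (pre ++ pvOrbit (pvStepF d processed) e k) a
          = (pre ++ pvOrbit (pvStepF d processed) e p, e) ∧
      pvUnroll (pvStepF d processed) e fb (pre ++ pvOrbit (pvStepF d processed) e k) a
          = (pre ++ pvOrbit (pvStepF d processed) e p, e) := by
  intro m
  induction m with
  | zero =>
    intro k fa fb a hm hk1 hkp hfa hfb ha
    have hkp' : k = p := by omega
    rw [hkp'] at ha
    have hae : a = e := by rw [hpe] at ha; simpa using ha.symm
    rw [hkp', hae]
    obtain ⟨nxt, hnxt⟩ := pvIter_step (pvStepF d processed) p e e hp1 hpe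
    obtain ⟨hd, hpp⟩ := pvStepF_some d processed e nxt hnxt
    have hmemo : e ∈ pvOrbit (pvStepF d processed) e p :=
      pvOrbit_head (pvStepF d processed) e p hp1
    have hcontains :
        ((pre ++ pvOrbit (pvStepF d processed) e p).contains e || processed.contains e)
          = true := by
      rw [pvContains_true _ e (List.mem_append_right pre hmemo)]
      rfl
    constructor
    · cases fa with
      | zero => rfl
      | succ fa => simp only [pvWalkA, hd, hcontains, reduceIte]
    · cases fb with
      | zero => rfl
      | succ fb => simp only [pvUnroll, beq_self_eq_true, reduceIte]
  | succ m ih =>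
    intro k fa fb a hm hk1 hkp hfa hfb ha
    have hkltp : k < p := by omega
    have hane : a ≠ e := by
      intro h
      subst h
      exact hmin k hkltp ⟨hk1, ha⟩
    have hrem : pvIter (pvStepF d processed) (p - k) a = some e :=
      pvIter_chunk (pvStepF d processed) e a k p (le_of_lt hkltp) ha e hpe
    obtain ⟨b, hb⟩ := pvIter_step (pvStepF d processed) (p - k) a e (by omega) hrem
    obtain ⟨hd, hpp⟩ := pvStepF_some d processed a b hb
    have hb1 : pvIter (pvStepF d processed) (k + 1) e = some b := by
      rw [pvIter_add' (pvStepF d processed) k 1 e a ha, pvIter_one]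
      exact hb
    have haret : pvRet (pvStepF d processed) a := by
      refine ⟨(p - k) + k, by omega, ?_⟩
      rw [pvIter_add' (pvStepF d processed) (p - k) k a e hrem]
      exact ha
    have hapre : a ∉ pre := fun h => hpre a h haret
    have haorb : a ∉ pvOrbit (pvStepF d processed) e k := by
      intro hmem
      obtain ⟨j, hj, hjg⟩ := List.mem_map.mp hmem
      have hjk := List.mem_range.mp hj
      obtain ⟨aj, haj⟩ :=
        pvIter_isSome_of_le (pvStepF d processed) e e p j (by omega) hpe
      rw [haj] at hjg
      simp at hjg
      exact pvIter_ne_of_min (pvStepF d processed) e p j k hpe hmin hjk hkltp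
        (by rw [haj, hjg, ha])
    have hamem : a ∉ pre ++ pvOrbit (pvStepF d processed) e k := by
      intro h
      rcases List.mem_append.mp h with h | h
      · exact hapre h
      · exact haorb h
    have hcond :
        ((pre ++ pvOrbit (pvStepF d processed) e k).contains a || processed.contains a)
          = false := by
      rw [pvContains_false _ a hamem, hpp]
      rfl
    have horb : pvOrbit (pvStepF d processed) e (k + 1)
        = pvOrbit (pvStepF d processed) e k ++ [a] := pvOrbit_succ _ e a k ha
    have happ : (pre ++ pvOrbit (pvStepF d processed) e k) ++ [a]
        = pre ++ pvOrbit (pvStepF d processed) e (k + 1) := by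
      rw [horb, List.append_assoc]
    obtain ⟨fa', hfa'⟩ : ∃ fa', fa = fa' + 1 := ⟨fa - 1, by omega⟩
    obtain ⟨fb', hfb'⟩ : ∃ fb', fb = fb' + 1 := ⟨fb - 1, by omega⟩
    subst hfa' hfb'
    have hrec := ih (k + 1) fa' fb' b (by omega) (by omega) (by omega) (by omega) (by omega) hb1
    have habeq : (a == e) = false := by simpa using hane
    constructor
    · simp only [pvWalkA, hd, hcond, reduceIte]
      rw [happ]
      exact hrec.1
    · simp only [pvUnroll, habeq, reduceIte, hb]
      rw [happ]
      exact hrec.2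

-- ===== the pre-cycle phase: the two walks agree =====
lemma pvW1 (d : PySem.Dict String String) (processed : List String)
    (K : List String)
    (hK : ∀ x y, pvStepF d processed x = some y → x ∈ K) (hKnd : K.Nodup)
    (cyc : PySem.Set String)
    (hcyc : ∀ x, PySem.Set.contains cyc x = true ↔ pvRet (pvStepF d processed) x)
    (ufuel : Nat) (hufuel : K.length ≤ ufuel) :
    ∀ (fa fb : Nat) (path : List String) (curr : String),
      pvChainP (pvStepF d processed) path curr →
      (∀ x ∈ path, ¬ pvRet (pvStepF d processed) x) →
      (∀ x ∈ path, x ∈ K) → path.Nodup →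
      K.length + 1 ≤ path.length + fa → K.length + 1 ≤ path.length + fb →
      ∃ P c idx, pvWalkB (pvStepF d processed) cyc ufuel fb path curr = (P, c, idx) ∧
        pvWalkA d processed fa path curr = (P, c) ∧
        (idx = none → c ∉ P) ∧
        (∀ i, idx = some i → PySem.List.index? P c = some i ∧
          ∃ q, 1 ≤ q ∧ pvIter (pvStepF d processed) q c = some c ∧
            P.drop i = pvOrbit (pvStepF d processed) c q) := by
  intro fa
  induction fa with
  | zero =>
    intro fb path curr hch hnr hsub hnd hfa hfb
    have := (List.subperm_of_subset hnd hsub).length_le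
    omega
  | succ fa ih =>
    intro fb path curr hch hnr hsub hnd hfa hfb
    obtain ⟨fb', hfb'⟩ : ∃ fb', fb = fb' + 1 := by
      have := (List.subperm_of_subset hnd hsub).length_le
      exact ⟨fb - 1, by omega⟩
    subst hfb'
    cases hfc : pvStepF d processed curr with
    | none =>
      have hcpath : curr ∉ path := by
        intro hmem
        obtain ⟨m, hm, hit⟩ := pvChain_reach (pvStepF d processed) path curr curr hch hmem
        obtain ⟨y, hy⟩ := pvIter_step (pvStepF d processed) m curr curr hm hit
        rw [hfc] at hy
        simp at hy
      refine ⟨path, curr, none, ?_, ?_, fun _ => hcpath, by simp⟩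
      · simp only [pvWalkB, hfc]
      · rcases pvStepF_none d processed curr hfc with hd | hp
        · simp only [pvWalkA, hd]
        · cases hd : d.get? curr with
          | none => simp only [pvWalkA, hd]
          | some v =>
            have hcond : (path.contains curr || processed.contains curr) = true := by
              rw [hp, Bool.or_true]
            simp only [pvWalkA, hd, hcond, reduceIte]
    | some nxt =>
      obtain ⟨hd, hpp⟩ := pvStepF_some d processed curr nxt hfc
      by_cases hret : pvRet (pvStepF d processed) curr
      · -- cycle entry: B unrolls, A keeps walking around the cycle
        have hcyct : PySem.Set.contains cyc curr = true := (hcyc curr).mpr hret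
        have hcpath : curr ∉ path := fun h => hnr curr h hret
        have hcond : (path.contains curr || processed.contains curr) = false := by
          rw [pvContains_false path curr hcpath, hpp]
          rfl
        haveI : DecidablePred (fun j => 1 ≤ j ∧ pvIter (pvStepF d processed) j curr = some curr) :=
          fun j => inferInstance
        have hp := Nat.find_spec hret
        set p := Nat.find hret with hpdef
        have hmin : ∀ q, q < p → ¬(1 ≤ q ∧ pvIter (pvStepF d processed) q curr = some curr) :=
          fun q hq => Nat.find_min hret hq
        have hornd := pvOrbit_nodup (pvStepF d processed) curr p hp.2 hmin
        have horsub : ∀ z ∈ pvOrbit (pvStepF d processed) curr p, z ∈ K := by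
          intro z hz
          obtain ⟨y, hy, _⟩ := pvOrbit_next (pvStepF d processed) curr z p hp.1 hp.2 hz
          exact hK z y hy
        have hdisj : ∀ z ∈ path, z ∉ pvOrbit (pvStepF d processed) curr p := by
          intro z hz hzo
          exact hnr z hz (pvOrbit_ret (pvStepF d processed) curr z p hp.1 hp.2 hzo)
        have hbig : (path ++ pvOrbit (pvStepF d processed) curr p).Nodup := by
          rw [List.nodup_append]
          refine ⟨hnd, hornd, ?_⟩
          intro a ha b hb hab
          subst hab
          exact hdisj a ha hb
        have hbigsub : ∀ z ∈ path ++ pvOrbit (pvStepF d processed) curr p, z ∈ K := by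
          intro z hz
          rcases List.mem_append.mp hz with h | h
          · exact hsub z h
          · exact horsub z h
        have hlen := (List.subperm_of_subset hbig hbigsub).length_le
        rw [List.length_append, pvOrbit_length] at hlen
        have horb1 : pvOrbit (pvStepF d processed) curr 1 = [curr] := by
          simp [pvOrbit, List.range_succ, pvIter]
        have hit1 : pvIter (pvStepF d processed) 1 curr = some nxt := by
          rw [pvIter_one]; exact hfc
        have hw2 := pvW2 d processed curr p hp.1 hp.2 hmin path hnr (p - 1) 1 fa ufuel nxt
          rfl (le_refl 1) hp.1 (by omega) (by omega) hit1
        rw [horb1] at hw2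
        refine ⟨path ++ pvOrbit (pvStepF d processed) curr p, curr, some path.length,
          ?_, ?_, ?_, ?_⟩
        · simp only [pvWalkB, hfc, hcyct, reduceIte]
          rw [hw2.2]
        · simp only [pvWalkA, hd, hcond, reduceIte]
          exact hw2.1
        · intro h; simp at h
        · intro i hi
          have hieq : i = path.length := by
            have h := hi.symm
            simpa using h
          subst hieq
          refine ⟨?_, p, hp.1, hp.2, ?_⟩
          · rw [pvIndex?_append_of_notin path _ curr hcpath]
            obtain ⟨t, ht⟩ := pvOrbit_cons (pvStepF d processed) curr p hp.1
            rw [ht, PySem.List.index?_cons_self]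
            simp
          · rw [List.drop_left]
      · -- ordinary step: both walks advance
        have hcycf : PySem.Set.contains cyc curr = false := by
          rw [Bool.eq_false_iff]
          intro h
          exact hret ((hcyc curr).mp h)
        have hcpath : curr ∉ path := by
          intro hmem
          exact hret (pvChain_not_ret (pvStepF d processed) path curr hch hmem)
        have hcond : (path.contains curr || processed.contains curr) = false := by
          rw [pvContains_false path curr hcpath, hpp]
          rfl
        have hrec := ih fb' (path ++ [curr]) nxt
          (pvChain_append (pvStepF d processed) path curr nxt hch hfc)
          (by
            intro x hx
            rcases List.mem_append.mp hx with h | h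
            · exact hnr x h
            · have hxc : x = curr := by simpa using h
              rw [hxc]; exact hret)
          (by
            intro x hx
            rcases List.mem_append.mp hx with h | h
            · exact hsub x h
            · have hxc : x = curr := by simpa using h
              rw [hxc]; exact hK curr nxt hfc)
          (by
            rw [List.nodup_append]
            refine ⟨hnd, List.nodup_singleton curr, ?_⟩
            intro a ha b hb hab
            subst hab
            have hac : a = curr := by simpa using hb
            subst hac
            exact hcpath ha)
          (by simp only [List.length_append, List.length_singleton]; omega)
          (by simp only [List.length_append, List.length_singleton]; omega)
        obtain ⟨P, c, idx, hB, hA, hnone, hsome⟩ := hrec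
        refine ⟨P, c, idx, ?_, ?_, hnone, hsome⟩
        · simp only [pvWalkB, hfc, hcycf, reduceIte]
          exact hB
        · simp only [pvWalkA, hd, hcond, reduceIte]
          exact hA

-- ===== relating the two fold states =====
def pvRel (f : String → Option String)
    (stA : List (List String) × List (List String) × PySem.Set String)
    (stB : List (List String) × List (List String) × PySem.Set String × PySem.Set String) :
    Prop :=
  stA.2.1 = stB.2.1 ∧ stA.2.2 = stB.2.2.1 ∧
  stA.1.foldl pvDedupA ([], PySem.Set.empty) = (stB.1, stB.2.2.2) ∧
  pvSeenClosed f stB.2.2.2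

lemma pvStep_rel (d : PySem.Dict String String) (processed : List String)
    (K : List String)
    (hK : ∀ x y, pvStepF d processed x = some y → x ∈ K) (hKnd : K.Nodup)
    (cyc : PySem.Set String)
    (hcyc : ∀ x, PySem.Set.contains cyc x = true ↔ pvRet (pvStepF d processed) x)
    (fuelA fuelB : Nat) (hfa : K.length + 1 ≤ fuelA) (hfb : K.length + 1 ≤ fuelB)
    (p : String)
    (stA : List (List String) × List (List String) × PySem.Set String)
    (stB : List (List String) × List (List String) × PySem.Set String × PySem.Set String)
    (h : pvRel (pvStepF d processed) stA stB) :
    pvRel (pvStepF d processed) (pvStepA d processed fuelA stA p)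
      (pvStepB (pvStepF d processed) processed cyc fuelB stB p) := by
  obtain ⟨h1, h2, h3, h4⟩ := h
  unfold pvStepA pvStepB
  rw [← h2]
  by_cases hskip : PySem.Set.contains stA.2.2 p = true
  · simp only [hskip, reduceIte, Bool.false_eq_true, Bool.true_eq_false, eq_self_iff_true,
      if_true, if_false]
    exact ⟨h1, h2, h3, h4⟩
  · have hskip' : PySem.Set.contains stA.2.2 p = false := Bool.eq_false_iff.mpr hskip
    obtain ⟨P, c, idx, hB, hA, hnone, hsome⟩ :=
      pvW1 d processed K hK hKnd cyc hcyc fuelB (by omega) fuelA fuelB [] p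
        trivial (by simp) (by simp) List.nodup_nil (by simpa using hfa) (by simpa using hfb)
    rw [hB, hA]
    by_cases hw : (c == "w") = true
    · simp only [hskip', hw, reduceIte, Bool.false_eq_true, Bool.true_eq_false,
        eq_self_iff_true, if_true, if_false]
      exact ⟨by rw [h1], rfl, by simpa using h3, h4⟩
    · have hw' : (c == "w") = false := Bool.eq_false_iff.mpr hw
      by_cases hpc : processed.contains c = true
      · simp only [hskip', hw', hpc, reduceIte, Bool.false_eq_true, Bool.true_eq_false,
          eq_self_iff_true, if_true, if_false]
        exact ⟨by rw [h1], rfl, by simpa using h3, h4⟩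
      · have hpc' : processed.contains c = false := Bool.eq_false_iff.mpr hpc
        cases hidx : idx with
        | none =>
          have hcP := hnone hidx
          have hii : PySem.List.index? P c = none := (PySem.List.index?_eq_none_iff P c).mpr hcP
          simp only [hskip', hw', hpc', hii, reduceIte, Bool.false_eq_true, Bool.true_eq_false,
            eq_self_iff_true, if_true, if_false]
          exact ⟨h1, rfl, by simpa using h3, h4⟩
        | some i =>
          obtain ⟨hix, q, hq1, hqc, hdrop⟩ := hsome i hidx
          have hfold : (stA.1 ++ [P.drop i]).foldl pvDedupA ([], PySem.Set.empty)
              = pvDedupA (stB.1, stB.2.2.2) (P.drop i) := by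
            rw [List.foldl_append, h3]
            rfl
          have hcyc_head : c ∈ P.drop i := by
            rw [hdrop]
            exact pvOrbit_head (pvStepF d processed) c q hq1
          by_cases hseen : PySem.Set.contains stB.2.2.2 c = true
          · have hany : (P.drop i).any (fun node => PySem.Set.contains stB.2.2.2 node) = true :=
              List.any_eq_true.mpr ⟨c, hcyc_head, hseen⟩
            simp only [hskip', hw', hpc', hix, hseen, reduceIte, Bool.false_eq_true,
              Bool.true_eq_false, eq_self_iff_true, if_true, if_false]
            refine ⟨h1, rfl, ?_, h4⟩
            rw [hfold]
            unfold pvDedupA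
            simp only [hany, reduceIte, Bool.false_eq_true, Bool.true_eq_false,
              eq_self_iff_true, if_true, if_false]
          · have hseen' : PySem.Set.contains stB.2.2.2 c = false := Bool.eq_false_iff.mpr hseen
            have hany : (P.drop i).any (fun node => PySem.Set.contains stB.2.2.2 node)
                = false := by
              rw [Bool.eq_false_iff]
              intro hanyt
              obtain ⟨z, hz, hzs⟩ := List.any_eq_true.mp hanyt
              have hzmem : z ∈ stB.2.2.2 := (pvSetContains_iff _ z).mp hzs
              rw [hdrop] at hz
              obtain ⟨j, hjq, hj⟩ := (pvOrbit_mem (pvStepF d processed) c z q hqc).mp hz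
              have hrem : pvIter (pvStepF d processed) (q - j) z = some c :=
                pvIter_chunk (pvStepF d processed) c z j q (le_of_lt hjq) hj c hqc
              have hcmem : c ∈ stB.2.2.2 :=
                pvSeenClosed_iter (pvStepF d processed) stB.2.2.2 h4 (q - j) z c hzmem hrem
              rw [(pvSetContains_iff _ c).mpr hcmem] at hseen'
              simp at hseen'
            simp only [hskip', hw', hpc', hix, hseen', reduceIte, Bool.false_eq_true,
              Bool.true_eq_false, eq_self_iff_true, if_true, if_false]
            refine ⟨h1, rfl, ?_, ?_⟩
            · rw [hfold]
              unfold pvDedupA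
              simp only [hany, reduceIte, Bool.false_eq_true, Bool.true_eq_false,
                eq_self_iff_true, if_true, if_false]
            · intro z hz
              rw [PySem.Set.mem_update] at hz
              rcases hz with hz | hz
              · obtain ⟨y, hy, hys⟩ := h4 z hz
                exact ⟨y, hy, (PySem.Set.mem_update _ _ y).mpr (Or.inl hys)⟩
              · rw [hdrop] at hz
                obtain ⟨y, hy, hyo⟩ :=
                  pvOrbit_next (pvStepF d processed) c z q hq1 hqc hz
                exact ⟨y, hy, (PySem.Set.mem_update _ _ y).mpr (Or.inr (hdrop ▸ hyo))⟩

lemma pvFold_rel (d : PySem.Dict String String) (processed : List String)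
    (K : List String)
    (hK : ∀ x y, pvStepF d processed x = some y → x ∈ K) (hKnd : K.Nodup)
    (cyc : PySem.Set String)
    (hcyc : ∀ x, PySem.Set.contains cyc x = true ↔ pvRet (pvStepF d processed) x)
    (fuelA fuelB : Nat) (hfa : K.length + 1 ≤ fuelA) (hfb : K.length + 1 ≤ fuelB)
    (l : List String) :
    ∀ stA stB, pvRel (pvStepF d processed) stA stB →
      pvRel (pvStepF d processed) (l.foldl (pvStepA d processed fuelA) stA)
        (l.foldl (pvStepB (pvStepF d processed) processed cyc fuelB) stB) := by
  induction l with
  | nil => intro stA stB h; exact h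
  | cons x xs ih =>
    intro stA stB h
    exact ih _ _ (pvStep_rel d processed K hK hKnd cyc hcyc fuelA fuelB hfa hfb x stA stB h)

-- the dict built from the pointer list has at most |pointers| keys
lemma pvFoldAddLen (l : List String) :
    ∀ s : PySem.Set String, (l.foldl PySem.Set.add s).length ≤ s.length + l.length := by
  induction l with
  | nil => intro s; simp
  | cons y l ih =>
    intro s
    simp only [List.foldl_cons, List.length_cons]
    have h1 : (PySem.Set.add s y).length ≤ s.length + 1 := by
      unfold PySem.Set.add
      split
      · omega
      · simp
    have h2 := ih (PySem.Set.add s y)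
    omega

lemma pvKeysLen (pointers : List (String × String)) :
    (PySem.Dict.ofList pointers).keys.length ≤ pointers.length := by
  have hk : (PySem.Dict.ofList pointers).keys = PySem.Set.ofList (pointers.map Prod.fst) := by
    show (List.foldl (fun acc (p : String × String) => acc.insert p.1 p.2)
        PySem.Dict.empty pointers).keys = _
    rw [PySem.Dict.keys_foldl_insert_key pointers Prod.fst (fun d x => x.2) PySem.Dict.empty]
    rw [PySem.Dict.keys_empty, PySem.Set.update_nil_left]
  rw [hk, PySem.Set.ofList_eq_foldl]
  have h := pvFoldAddLen (pointers.map Prod.fst) []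
  simpa using h

lemma pvSizeEqKeys (d : PySem.Dict String String) : d.size = d.keys.length := by
  simp [PySem.Dict.size, PySem.Dict.keys]

-- ===== VERDICT (by name: the statement is the Claim_ definition above) =====
theorem find_cycles_and_w_chains_py_spec : Claim_equal_find_cycles_and_w_chains_py := by
  intro pointers active_patients processed_in_keep _
  unfold Spec_find_cycles_and_w_chains_py
  unfold find_cycles_and_w_chains_py find_cycles_and_w_chains_py_alt
  simp only
  set processed : PySem.Set String := processed_in_keep.getD PySem.Set.empty with hproc
  set d := PySem.Dict.ofList pointers with hd
  have hK : ∀ x y, pvStepF d processed x = some y → x ∈ d.keys := by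
    intro x y h
    obtain ⟨hg, _⟩ := pvStepF_some d processed x y h
    have hc : d.contains x = true := by
      rw [PySem.Dict.contains_eq_isSome_get?, hg]
      rfl
    exact (PySem.Dict.contains_iff_mem_keys d x).mp hc
  have hKnd : d.keys.Nodup := PySem.Dict.nodup_keys_ofList pointers
  have hn : d.size = d.keys.length := pvSizeEqKeys d
  have hcyc : ∀ x, PySem.Set.contains (pvCycSet (pvStepF d processed) d.keys d.size) x = true ↔
      pvRet (pvStepF d processed) x := by
    intro x
    rw [hn]
    exact pvCycSet_iff d processed d.keys hK hKnd x
  have hrel := pvFold_rel d processed d.keys hK hKnd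
    (pvCycSet (pvStepF d processed) d.keys d.size) hcyc
    (pointers.length + 1) (d.size + 1)
    (by have hb := pvKeysLen pointers; rw [← hd] at hb; omega) (by omega)
    active_patients ([], [], PySem.Set.empty) ([], [], PySem.Set.empty, PySem.Set.empty)
    ⟨rfl, rfl, rfl, by intro x hx; simp [PySem.Set.empty] at hx⟩
  obtain ⟨h1, h2, h3, h4⟩ := hrel
  rw [h3, h1]
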